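-- pv_equiv track=rewrite | github.com/jiwon79/BOJ-python | 백준/Silver/1316.그룹 단어 체커/그룹 단어 체커.py | checkGroupWord
-- ===== SOURCE A (Python) =====
-- def checkGroupWord(word):
--   wordDict = {word[0]: 1}
--
--   for i in range(1, len(word)):
--     if (word[i] != word[i-1]):
--       if (word[i] in wordDict):
--         return False
--       wordDict[word[i]] = 1
--   return True
-- ===== SOURCE B (Python) =====
-- def checkGroupWord(word):
--     # Collapse runs of equal characters into their key characters, then the
--     # word is a group word iff all run keys are pairwise distinct.
--     keys = []
--     prev = None
--     for c in word:
--         if c != prev: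
--             keys.append(c)
--             prev = c
--     return len(keys) == len(set(keys))
-- ===== Notes on version B (the rewrite author's own statement) =====
-- stated objective: idiomatic
-- what changed: A scans with an early-return dict-membership test per new run; B first collapses the word into its list of run keys and then decides the answer with one global distinctness check (len(keys) == len(set(keys))), with no early return and no dict during the scan.
import Mathlib
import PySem

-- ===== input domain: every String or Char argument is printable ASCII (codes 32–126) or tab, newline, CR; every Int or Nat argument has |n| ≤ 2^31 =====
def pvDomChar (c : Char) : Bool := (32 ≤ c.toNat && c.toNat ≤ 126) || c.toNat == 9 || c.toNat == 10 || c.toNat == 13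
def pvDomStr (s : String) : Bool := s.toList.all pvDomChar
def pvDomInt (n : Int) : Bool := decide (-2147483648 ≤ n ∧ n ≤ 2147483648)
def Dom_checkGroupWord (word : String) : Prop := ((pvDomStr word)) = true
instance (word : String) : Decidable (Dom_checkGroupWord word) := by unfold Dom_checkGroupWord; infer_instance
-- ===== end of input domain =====

-- B collapses the word into its run keys and checks their global distinctness,
-- instead of A's early-return scan with a dict membership test (objective: idiomatic).

-- ===== PORT A =====
-- A's for-loop over i in range(1, len(word)), reading word[i] and word[i-1],
-- as the obvious structural recursion over the tail carrying prev = word[i-1] and the dict.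
def checkGroupWordGoA (d : PySem.Dict Char Int) (prev : Char) : List Char → Bool
  | [] => true
  | c :: t =>
    if c ≠ prev then
      if d.contains c then false
      else checkGroupWordGoA (d.insert c 1) c t
    else checkGroupWordGoA d prev t

def checkGroupWord (word : String) : Bool :=
  match word.toList with
  | [] => true  -- Python raises IndexError at word[0] here; excluded by Pre_checkGroupWord
  | c :: t => checkGroupWordGoA (PySem.Dict.empty.insert c 1) c t

-- ===== PORT B =====
-- Source B's single loop: state (keys, prev), appending c when c != prev.
def checkGroupWordStep (st : List Char × Option Char) (c : Char) : List Char × Option Char :=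
  if some c ≠ st.2 then (st.1 ++ [c], some c) else st

def checkGroupWord_alt (word : String) : Bool :=
  let st := word.toList.foldl checkGroupWordStep ([], none)
  st.1.length == (PySem.Set.ofList st.1).length

-- ===== PRECONDITION & SPEC =====
-- Pre_ excludes only the empty string, on which A raises IndexError (word[0]).
def Pre_checkGroupWord (word : String) : Prop := word.toList ≠ []
instance (word : String) : Decidable (Pre_checkGroupWord word) := by unfold Pre_checkGroupWord; infer_instance
def pvWitness_checkGroupWord : String := "aabba"

def Spec_checkGroupWord (word : String) (out : Bool) : Prop := out = checkGroupWord_alt word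
instance (word : String) (out : Bool) : Decidable (Spec_checkGroupWord word out) := by unfold Spec_checkGroupWord; infer_instance

-- ===== CLAIM (what is proved, stated in full; the proofs are below) =====
def Claim_equal_checkGroupWord : Prop := ∀ (word : String), Dom_checkGroupWord word → Pre_checkGroupWord word → Spec_checkGroupWord word (checkGroupWord word)

-- ===== LEMMAS AND PROOFS =====

-- run keys of t given that the previous character was p
def pvRuns (p : Char) : List Char → List Char
  | [] => []
  | c :: t => if c = p then pvRuns p t else c :: pvRuns c t

theorem goA_eq_true_iff (l : List Char) (p : Char) (d : PySem.Dict Char Int) :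
    checkGroupWordGoA d p l = true ↔
      (pvRuns p l).Nodup ∧ ∀ c ∈ pvRuns p l, d.contains c = false := by
  induction l generalizing p d with
  | nil => simp [checkGroupWordGoA, pvRuns]
  | cons c t ih =>
    by_cases hcp : c = p
    · simpa [checkGroupWordGoA, pvRuns, hcp] using ih p d
    · have hrw : pvRuns p (c :: t) = c :: pvRuns c t := by simp [pvRuns, hcp]
      rw [hrw]
      by_cases hc : d.contains c = true
      · have hL : checkGroupWordGoA d p (c :: t) = false := by
          simp [checkGroupWordGoA, hcp, hc]
        rw [hL]
        constructor
        · intro h; exact absurd h (by simp)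
        · rintro ⟨_, hall⟩
          have hfc := hall c List.mem_cons_self
          rw [hc] at hfc
          exact absurd hfc (by decide)
      · have hL : checkGroupWordGoA d p (c :: t) = checkGroupWordGoA (d.insert c 1) c t := by
          simp [checkGroupWordGoA, hcp, hc]
        rw [hL, ih]
        have hcF : d.contains c = false := by simpa using hc
        constructor
        · rintro ⟨hnd, hall⟩
          have hcnot : c ∉ pvRuns c t := fun hm => by
            have := hall c hm
            simp at this
          refine ⟨List.nodup_cons.mpr ⟨hcnot, hnd⟩, ?_⟩
          intro x hx
          rcases List.mem_cons.mp hx with rfl | hx'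
          · exact hcF
          · have hins := hall x hx'
            rw [PySem.Dict.contains_insert] at hins
            simpa using (Bool.or_eq_false_iff.mp hins).2
        · rintro ⟨hnd, hall⟩
          rcases List.nodup_cons.mp hnd with ⟨hcnot, hnd'⟩
          refine ⟨hnd', fun x hx => ?_⟩
          rw [PySem.Dict.contains_insert]
          have hxc : x ≠ c := fun h => hcnot (h ▸ hx)
          simp [hxc, hall x (List.mem_cons_of_mem _ hx)]

theorem foldB_fst (l : List Char) (acc : List Char) (p : Char) :
    (l.foldl checkGroupWordStep (acc, some p)).1 = acc ++ pvRuns p l := by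
  induction l generalizing acc p with
  | nil => simp [pvRuns]
  | cons c t ih =>
    by_cases hcp : c = p
    · simp [List.foldl_cons, checkGroupWordStep, hcp, pvRuns, ih]
    · simp [List.foldl_cons, checkGroupWordStep, hcp, pvRuns, ih]

theorem ofList_sublist (xs : List Char) : List.Sublist (PySem.Set.ofList xs) xs := by
  induction xs with
  | nil => simp [PySem.Set.ofList_nil]
  | cons x t ih =>
    rw [PySem.Set.ofList_cons]
    refine List.Sublist.cons₂ x (List.Sublist.trans ?_ ih)
    simp [PySem.Set.discard, List.filter_sublist]

theorem beq_len_iff_nodup (xs : List Char) :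
    (xs.length == (PySem.Set.ofList xs).length) = true ↔ xs.Nodup := by
  rw [beq_iff_eq]
  constructor
  · intro h
    have := (ofList_sublist xs).eq_of_length h.symm
    rw [← this]
    exact PySem.Set.nodup_ofList xs
  · intro h
    rw [PySem.Set.ofList_eq_self_of_nodup xs h]

-- ===== VERDICT (by name: the statement is the Claim_ definition above) =====
theorem checkGroupWord_spec : Claim_equal_checkGroupWord := by
  intro word _ hpre
  unfold Spec_checkGroupWord checkGroupWord checkGroupWord_alt
  cases hw : word.toList with
  | nil => exact absurd hw hpre
  | cons c t =>
    rw [Bool.eq_iff_iff]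
    have hstep : checkGroupWordStep ([], none) c = ([c], some c) := by
      simp [checkGroupWordStep]
    rw [List.foldl_cons, hstep]
    simp only []
    rw [goA_eq_true_iff, beq_len_iff_nodup, foldB_fst]
    constructor
    · rintro ⟨hnd, hall⟩
      refine List.nodup_cons.mpr ⟨?_, hnd⟩
      intro hm
      have := hall c hm
      simp at this
    · intro hnd
      rcases List.nodup_cons.mp hnd with ⟨hcnot, hnd'⟩
      refine ⟨hnd', ?_⟩
      intro x hx
      rw [PySem.Dict.contains_insert]
      have hxc : x ≠ c := fun h => hcnot (h ▸ hx)
      simp [hxc, PySem.Dict.contains_empty]
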